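-- pv_equiv track=rewrite | github.com/brighteast99/coding-test-problems | boj/삼성 SW 역량 테스트 기출/원판 돌리기/solution.py | remove_adjacents
-- ===== SOURCE A (Python) =====
-- from collections import deque
--
-- ADJACENT_VECTORS = [(-1, 0), (1, 0), (0, 1), (0, -1)]
--
-- def remove_adjacents(n, m, plates):
--     removed = 0
--     for i in range(1, n + 1):
--         for j in range(m):
--             num = plates[i][j]
--             if num == 0:
--                 continue
--
--             same_numbers = set()
--             queue = deque([(i, j)])
--             while len(queue) > 0:
--                 cur_i, cur_j = queue.popleft()
--
--                 if (cur_i, cur_j) in same_numbers: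
--                     continue
--                 same_numbers.add((cur_i, cur_j))
--
--                 for di, dj in ADJACENT_VECTORS:
--                     if not (1 <= cur_i + di <= n):
--                         continue
--                     if plates[cur_i + di][(cur_j + dj) % m] != num:
--                         continue
--                     queue.append((cur_i + di, (cur_j + dj) % m))
--
--             if len(same_numbers) > 1:
--                 removed += len(same_numbers)
--                 for cur_i, cur_j in same_numbers:
--                     plates[cur_i][cur_j] = 0
--
--     return removed
-- ===== SOURCE B (Python) =====
-- def remove_adjacents(n, m, plates):
--     # Local rule: a nonzero cell must be removed iff it has at least one
--     # equal-valued (distinct) neighbour (rows 1..n, columns wrap mod m).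
--     removed = 0
--     to_zero = []
--     for i in range(1, n + 1):
--         for j in range(m):
--             num = plates[i][j]
--             if num == 0:
--                 continue
--             if ((i > 1 and plates[i - 1][j] == num)
--                     or (i < n and plates[i + 1][j] == num)
--                     or (m > 1 and (plates[i][(j + 1) % m] == num
--                                    or plates[i][(j - 1) % m] == num))):
--                 removed += 1
--                 to_zero.append((i, j))
--     for i, j in to_zero:
--         plates[i][j] = 0
--     return removed
-- ===== Notes on version B (the rewrite author's own statement) =====
-- stated objective: simpler
-- what changed: A BFS-flood-fills each nonzero cell's connected component with a deque and visited set and zeroes components of size > 1 while scanning; B replaces all of that with a single local test per cell (a nonzero cell is removed iff it has an equal-valued distinct neighbour, vertically in rows 1..n or horizontally with wrap-around), since the removed count equals the number of cells in components of size > 1, i.e. cells with at least one equal neighbour.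
import Mathlib
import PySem

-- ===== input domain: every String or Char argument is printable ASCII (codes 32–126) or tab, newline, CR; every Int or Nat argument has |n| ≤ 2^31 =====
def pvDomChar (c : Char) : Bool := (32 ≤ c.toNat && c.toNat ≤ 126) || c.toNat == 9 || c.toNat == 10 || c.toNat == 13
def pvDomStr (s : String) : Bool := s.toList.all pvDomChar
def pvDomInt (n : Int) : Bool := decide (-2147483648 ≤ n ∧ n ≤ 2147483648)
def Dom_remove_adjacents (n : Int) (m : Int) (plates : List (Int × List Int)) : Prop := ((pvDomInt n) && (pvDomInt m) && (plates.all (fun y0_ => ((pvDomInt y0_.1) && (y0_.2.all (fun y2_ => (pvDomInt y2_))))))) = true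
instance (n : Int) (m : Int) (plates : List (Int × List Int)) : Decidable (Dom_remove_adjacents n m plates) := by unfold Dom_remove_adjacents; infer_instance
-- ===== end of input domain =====

-- B replaces A's per-cell BFS flood fill by a single local scan: a nonzero cell is removed
-- iff it has an equal-valued distinct neighbour (objective: simpler). Both Pythons mutate
-- `plates` identically (they zero the same cells); the equivalence proved here is about the
-- return value.

-- ===== PORT A =====
-- plates[i][j] with default 0 (total form; Pre_ guarantees every read A performs is in range)
def pvRead (g : PySem.Dict Int (List Int)) (i j : Int) : Int :=
  PySem.List.pyGetD (g.getD i []) j 0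

-- the `for di, dj in ADJACENT_VECTORS` loop body: neighbours of c that pass both `continue` guards
def pvPush (n m : Int) (g : PySem.Dict Int (List Int)) (num : Int) (c : Int × Int) :
    List (Int × Int) :=
  [((-1 : Int), (0 : Int)), (1, 0), (0, 1), (0, -1)].filterMap (fun dd =>
    if 1 ≤ c.1 + dd.1 ∧ c.1 + dd.1 ≤ n ∧
        pvRead g (c.1 + dd.1) (PySem.Int.mod (c.2 + dd.2) m) = num then
      some (c.1 + dd.1, PySem.Int.mod (c.2 + dd.2) m)
    else none)

-- the `while len(queue) > 0` BFS loop; fuel only makes the recursion structural — under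
-- Pre_ it is large enough never to run out (proved below)
def pvBfs (n m : Int) (g : PySem.Dict Int (List Int)) (num : Int) :
    Nat → List (Int × Int) → PySem.Set (Int × Int) → PySem.Set (Int × Int)
  | _, [], vis => vis
  | 0, _ :: _, vis => vis
  | fuel + 1, c :: queue, vis =>
    if c ∈ vis then pvBfs n m g num fuel queue vis
    else pvBfs n m g num fuel (queue ++ pvPush n m g num c) (PySem.Set.add vis c)

-- `for cur_i, cur_j in same_numbers: plates[cur_i][cur_j] = 0`
def pvZero (g : PySem.Dict Int (List Int)) (cells : List (Int × Int)) :
    PySem.Dict Int (List Int) :=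
  cells.foldl (fun g c => g.modify c.1 [] (fun row => PySem.List.pySetD row c.2 0)) g

-- body of A's double loop, state = (removed, plates)
def pvStepA (n m : Int) (st : Int × PySem.Dict Int (List Int)) (c : Int × Int) :
    Int × PySem.Dict Int (List Int) :=
  let num := pvRead st.2 c.1 c.2
  if num = 0 then st
  else
    let vis := pvBfs n m st.2 num (1 + 5 * (n.toNat * m.toNat)) [c] PySem.Set.empty
    if 1 < vis.length then (st.1 + (vis.length : Int), pvZero st.2 vis) else st

def remove_adjacents (n : Int) (m : Int) (plates : List (Int × List Int)) : Int :=
  ((PySem.List.pyRange 1 (n + 1) 1).foldl (fun st i =>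
    (PySem.List.pyRange 0 m 1).foldl (fun st j => pvStepA n m st (i, j)) st)
    ((0 : Int), PySem.Dict.mk plates)).1

-- ===== PORT B =====
-- B's local test: does cell (i,j) (value num ≠ 0) have an equal-valued distinct neighbour?
def pvHasNbrB (n m : Int) (g : PySem.Dict Int (List Int)) (i j num : Int) : Bool :=
  (decide (1 < i) && decide (pvRead g (i - 1) j = num)) ||
  (decide (i < n) && decide (pvRead g (i + 1) j = num)) ||
  (decide (1 < m) && (decide (pvRead g i (PySem.Int.mod (j + 1) m) = num) ||
                      decide (pvRead g i (PySem.Int.mod (j - 1) m) = num)))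

def remove_adjacents_alt (n : Int) (m : Int) (plates : List (Int × List Int)) : Int :=
  let g := PySem.Dict.mk plates
  (PySem.List.pyRange 1 (n + 1) 1).foldl (fun removed i =>
    (PySem.List.pyRange 0 m 1).foldl (fun removed j =>
      let num := pvRead g i j
      if num = 0 then removed
      else if pvHasNbrB n m g i j num then removed + 1 else removed) removed) 0

-- ===== PRECONDITION & SPEC =====
-- Pre_ excludes exactly the inputs on which A raises (KeyError: a row i in 1..n missing
-- from the dict, or IndexError: such a row shorter than m); when m ≤ 0 A reads nothing.
def Pre_remove_adjacents (n : Int) (m : Int) (plates : List (Int × List Int)) : Prop :=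
  m ≤ 0 ∨ ∀ i ∈ PySem.List.pyRange 1 (n + 1) 1,
    (PySem.Dict.mk plates).contains i = true ∧
      m ≤ (((PySem.Dict.mk plates).getD i []).length : Int)
instance (n : Int) (m : Int) (plates : List (Int × List Int)) :
    Decidable (Pre_remove_adjacents n m plates) := by unfold Pre_remove_adjacents; infer_instance

def pvWitness_remove_adjacents : Int × Int × (List (Int × List Int)) :=
  (2, 2, [(1, [1, 1]), (2, [0, 1])])

def Spec_remove_adjacents (n : Int) (m : Int) (plates : List (Int × List Int)) (out : Int) : Prop :=
  out = remove_adjacents_alt n m plates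
instance (n : Int) (m : Int) (plates : List (Int × List Int)) (out : Int) :
    Decidable (Spec_remove_adjacents n m plates out) := by unfold Spec_remove_adjacents; infer_instance

-- ===== CLAIM (what is proved, stated in full; the proofs are below) =====
def Claim_equal_remove_adjacents : Prop := ∀ (n : Int) (m : Int) (plates : List (Int × List Int)), Dom_remove_adjacents n m plates → Pre_remove_adjacents n m plates → Spec_remove_adjacents n m plates (remove_adjacents n m plates)

-- ===== LEMMAS AND PROOFS =====

-- ---- the abstract grid, relation and components (v : value of a cell in the ORIGINAL plates)

def pvInG (n m : Int) (c : Int × Int) : Prop :=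
  1 ≤ c.1 ∧ c.1 ≤ n ∧ 0 ≤ c.2 ∧ c.2 < m

noncomputable def pvGridF (n m : Int) : Finset (Int × Int) := Finset.Icc 1 n ×ˢ Finset.Icc 0 (m - 1)

def pvMov (m : Int) (c d : Int × Int) : Prop :=
  d = (c.1 - 1, c.2) ∨ d = (c.1 + 1, c.2) ∨
  d = (c.1, PySem.Int.mod (c.2 + 1) m) ∨ d = (c.1, PySem.Int.mod (c.2 - 1) m)

-- one BFS step w.r.t. value map v (both endpoints same value)
def pvR (n m : Int) (v : Int × Int → Int) (c d : Int × Int) : Prop :=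
  pvMov m c d ∧ 1 ≤ d.1 ∧ d.1 ≤ n ∧ v d = v c

def pvReach (n m : Int) (v : Int × Int → Int) (c d : Int × Int) : Prop :=
  Relation.ReflTransGen (pvR n m v) c d

def pvHasNbr (n m : Int) (v : Int × Int → Int) (c : Int × Int) : Prop :=
  ∃ d, d ≠ c ∧ pvR n m v c d

noncomputable def pvComp (n m : Int) (v : Int × Int → Int) (c : Int × Int) : Finset (Int × Int) :=
  @Finset.filter _ (fun d => pvReach n m v c d) (fun _ => Classical.propDecidable _) (pvGridF n m)

-- cells already zeroed after processing the scan prefix pf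
noncomputable def pvZ (n m : Int) (v : Int × Int → Int) (pf : List (Int × Int)) : Finset (Int × Int) :=
  @Finset.filter _ (fun d => ∃ c ∈ pf, v c ≠ 0 ∧ pvHasNbr n m v c ∧ pvReach n m v c d)
    (fun _ => Classical.propDecidable _) (pvGridF n m)

-- the BFS step relation on the CURRENT grid w, target value num
def pvRN (n m : Int) (w : Int × Int → Int) (num : Int) (c d : Int × Int) : Prop :=
  pvMov m c d ∧ 1 ≤ d.1 ∧ d.1 ≤ n ∧ w d = num

-- loop invariant of A's double loop
def pvInv (n m : Int) (v : Int × Int → Int) (pf : List (Int × Int))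
    (st : Int × PySem.Dict Int (List Int)) : Prop :=
  st.1 = ((pvZ n m v pf).card : Int) ∧
  (∀ c : Int × Int, pvInG n m c →
    pvRead st.2 c.1 c.2 = if c ∈ pvZ n m v pf then 0 else v c) ∧
  (∀ i : Int, 1 ≤ i → i ≤ n →
    st.2.contains i = true ∧ m ≤ ((st.2.getD i []).length : Int))

-- ---- small facts

lemma pv_mem_gridF (n m : Int) (c : Int × Int) : c ∈ pvGridF n m ↔ pvInG n m c := by
  obtain ⟨a, b⟩ := c
  simp only [pvGridF, Finset.mem_product, Finset.mem_Icc, pvInG]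
  omega

lemma pv_gridF_card (n m : Int) : (pvGridF n m).card = n.toNat * m.toNat := by
  simp [pvGridF, Int.card_Icc]

lemma pv_mod_range (a m : Int) (hm : 0 < m) :
    0 ≤ PySem.Int.mod a m ∧ PySem.Int.mod a m < m := by
  rw [PySem.Int.mod_eq_emod_of_pos hm]
  exact ⟨Int.emod_nonneg a (by omega), Int.emod_lt_of_pos a hm⟩

lemma pv_emod_lemma1 (a m : Int) : (a % m + 1) % m = (a + 1) % m := by
  conv_lhs => rw [Int.add_emod, Int.emod_emod_of_dvd a dvd_rfl, ← Int.add_emod]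

lemma pv_emod_lemma2 (a m : Int) : (a % m - 1) % m = (a - 1) % m := by
  conv_lhs => rw [Int.sub_emod, Int.emod_emod_of_dvd a dvd_rfl, ← Int.sub_emod]

lemma pv_mov_symm (n m : Int) (c d : Int × Int) (hm : 0 < m) (hc : pvInG n m c)
    (h : pvMov m c d) : pvMov m d c := by
  obtain ⟨hc1, hc2, hc3, hc4⟩ := hc
  have hself : c.2 % m = c.2 := Int.emod_eq_of_lt hc3 hc4
  simp only [pvMov, PySem.Int.mod_eq_emod_of_pos hm] at h ⊢
  rcases h with rfl | rfl | rfl | rfl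
  · right; left; simp
  · left; simp
  · right; right; right
    rw [pv_emod_lemma2]
    simp [hself]
  · right; right; left
    rw [pv_emod_lemma1]
    simp [hself]

lemma pv_mov_col (n m : Int) (c d : Int × Int) (hm : 0 < m) (hc : pvInG n m c)
    (h : pvMov m c d) : 0 ≤ d.2 ∧ d.2 < m := by
  obtain ⟨_, _, hc3, hc4⟩ := hc
  rcases h with rfl | rfl | rfl | rfl
  · exact ⟨hc3, hc4⟩
  · exact ⟨hc3, hc4⟩
  · exact pv_mod_range _ m hm
  · exact pv_mod_range _ m hm

lemma pvR_InG {n m : Int} {v : Int × Int → Int} {c d : Int × Int} (hm : 0 < m)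
    (hc : pvInG n m c) (h : pvR n m v c d) : pvInG n m d := by
  obtain ⟨hmov, h1, h2, _⟩ := h
  exact ⟨h1, h2, pv_mov_col n m c d hm hc hmov⟩

lemma pvR_symm {n m : Int} {v : Int × Int → Int} {c d : Int × Int} (hm : 0 < m)
    (hc : pvInG n m c) (h : pvR n m v c d) : pvR n m v d c := by
  obtain ⟨hmov, _, _, hval⟩ := h
  exact ⟨pv_mov_symm n m c d hm hc hmov, hc.1, hc.2.1, hval.symm⟩

lemma pvReach_InG {n m : Int} {v : Int × Int → Int} {c d : Int × Int} (hm : 0 < m)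
    (hc : pvInG n m c) (h : pvReach n m v c d) : pvInG n m d := by
  induction h with
  | refl => exact hc
  | tail _ hR ih => exact pvR_InG hm ih hR

lemma pvReach_val {n m : Int} {v : Int × Int → Int} {c d : Int × Int}
    (h : pvReach n m v c d) : v d = v c := by
  induction h with
  | refl => rfl
  | tail _ hR ih => exact hR.2.2.2.trans ih

lemma pvReach_symm {n m : Int} {v : Int × Int → Int} {c d : Int × Int} (hm : 0 < m)
    (hc : pvInG n m c) (h : pvReach n m v c d) : pvReach n m v d c := by
  induction h with
  | refl => exact .refl
  | tail hcb hR ih =>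
      exact .head (pvR_symm hm (pvReach_InG hm hc hcb) hR) ih

lemma pv_first_step {n m : Int} {v : Int × Int → Int} {c d : Int × Int}
    (h : pvReach n m v c d) : d = c ∨ ∃ e, e ≠ c ∧ pvR n m v c e := by
  induction h with
  | refl => exact Or.inl rfl
  | tail _ hR ih =>
      rename_i b d' _
      rcases ih with rfl | he
      · by_cases hd : d' = b
        · exact Or.inl hd
        · exact Or.inr ⟨d', hd, hR⟩
      · exact Or.inr he

lemma pv_mem_comp (n m : Int) (v : Int × Int → Int) (c d : Int × Int) :
    d ∈ pvComp n m v c ↔ pvInG n m d ∧ pvReach n m v c d := by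
  simp [pvComp, Finset.mem_filter, pv_mem_gridF]

lemma pv_comp_eq {n m : Int} {v : Int × Int → Int} {c d : Int × Int} (hm : 0 < m)
    (hc : pvInG n m c) (h : pvReach n m v c d) : pvComp n m v d = pvComp n m v c := by
  ext e
  simp only [pv_mem_comp]
  constructor
  · rintro ⟨he, hr⟩; exact ⟨he, h.trans hr⟩
  · rintro ⟨he, hr⟩; exact ⟨he, (pvReach_symm hm hc h).trans hr⟩

lemma pv_card_comp (n m : Int) (v : Int × Int → Int) (c : Int × Int) (hm : 0 < m)
    (hc : pvInG n m c) : 1 < (pvComp n m v c).card ↔ pvHasNbr n m v c := by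
  constructor
  · intro h
    have hcmem : c ∈ pvComp n m v c := (pv_mem_comp n m v c c).mpr ⟨hc, .refl⟩
    obtain ⟨d, hd, hdne⟩ := Finset.exists_mem_ne h c
    have := ((pv_mem_comp n m v c d).mp hd).2
    rcases pv_first_step this with rfl | ⟨e, hene, hR⟩
    · exact absurd rfl hdne
    · exact ⟨e, hene, hR⟩
  · rintro ⟨d, hdne, hR⟩
    have hd : d ∈ pvComp n m v c :=
      (pv_mem_comp n m v c d).mpr ⟨pvR_InG hm hc hR, .single hR⟩
    have hcm : c ∈ pvComp n m v c := (pv_mem_comp n m v c c).mpr ⟨hc, .refl⟩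
    exact Finset.one_lt_card.mpr ⟨d, hd, c, hcm, hdne⟩

-- ---- Z lemmas

lemma pv_mem_Z (n m : Int) (v : Int × Int → Int) (pf : List (Int × Int)) (d : Int × Int) :
    d ∈ pvZ n m v pf ↔
      pvInG n m d ∧ ∃ c ∈ pf, v c ≠ 0 ∧ pvHasNbr n m v c ∧ pvReach n m v c d := by
  simp [pvZ, Finset.mem_filter, pv_mem_gridF]

lemma pvZ_closed {n m : Int} {v : Int × Int → Int} {pf : List (Int × Int)}
    {x d : Int × Int} (hm : 0 < m) (hx : pvInG n m x) (hxz : x ∉ pvZ n m v pf)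
    (hR : pvR n m v x d) : d ∉ pvZ n m v pf := by
  intro hd
  obtain ⟨hdg, c', hc'pf, hv, hnbr, hreach⟩ := (pv_mem_Z n m v pf d).mp hd
  exact hxz ((pv_mem_Z n m v pf x).mpr
    ⟨hx, c', hc'pf, hv, hnbr, hreach.tail (pvR_symm hm hx hR)⟩)

lemma pvZ_reach_closed {n m : Int} {v : Int × Int → Int} {pf : List (Int × Int)}
    {x d : Int × Int} (hm : 0 < m) (hx : pvInG n m x) (hxz : x ∉ pvZ n m v pf)
    (hr : pvReach n m v x d) : d ∉ pvZ n m v pf := by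
  induction hr with
  | refl => exact hxz
  | tail hxb hR ih => exact pvZ_closed hm (pvReach_InG hm hx hxb) ih hR

lemma pvZ_append_zero {n m : Int} {v : Int × Int → Int} {pf : List (Int × Int)}
    {c : Int × Int} (h : v c = 0 ∨ c ∈ pvZ n m v pf) :
    pvZ n m v (pf ++ [c]) = pvZ n m v pf := by
  ext d
  simp only [pv_mem_Z, List.mem_append, List.mem_singleton]
  constructor
  · rintro ⟨hdg, c', (hc' | rfl), hv, hnbr, hreach⟩
    · exact ⟨hdg, c', hc', hv, hnbr, hreach⟩
    · rcases h with h0 | hz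
      · exact absurd h0 hv
      · obtain ⟨_, c'', hc'', hv'', hnbr'', hreach''⟩ := (pv_mem_Z n m v pf c').mp hz
        exact ⟨hdg, c'', hc'', hv'', hnbr'', hreach''.trans hreach⟩
  · rintro ⟨hdg, c', hc', hv, hnbr, hreach⟩
    exact ⟨hdg, c', Or.inl hc', hv, hnbr, hreach⟩

lemma pvZ_append_comp {n m : Int} {v : Int × Int → Int} {pf : List (Int × Int)}
    {c : Int × Int} (hm : 0 < m) (hc : pvInG n m c) (hv : v c ≠ 0)
    (hnbr : pvHasNbr n m v c) :
    pvZ n m v (pf ++ [c]) = pvZ n m v pf ∪ pvComp n m v c := by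
  ext d
  simp only [pv_mem_Z, Finset.mem_union, pv_mem_comp, List.mem_append, List.mem_singleton]
  constructor
  · rintro ⟨hdg, c', (hc' | rfl), hv', hnbr', hreach⟩
    · exact Or.inl ⟨hdg, c', hc', hv', hnbr', hreach⟩
    · exact Or.inr ⟨hdg, hreach⟩
  · rintro (⟨hdg, c', hc', hv', hnbr', hreach⟩ | ⟨hdg, hreach⟩)
    · exact ⟨hdg, c', Or.inl hc', hv', hnbr', hreach⟩
    · exact ⟨hdg, c, Or.inr rfl, hv, hnbr, hreach⟩

lemma pvZ_append_nonbr {n m : Int} {v : Int × Int → Int} {pf : List (Int × Int)}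
    {c : Int × Int} (hnbr : ¬ pvHasNbr n m v c) :
    pvZ n m v (pf ++ [c]) = pvZ n m v pf := by
  ext d
  simp only [pv_mem_Z, List.mem_append, List.mem_singleton]
  constructor
  · rintro ⟨hdg, c', (hc' | rfl), hv', hnbr', hreach⟩
    · exact ⟨hdg, c', hc', hv', hnbr', hreach⟩
    · exact absurd hnbr' hnbr
  · rintro ⟨hdg, c', hc', hv', hnbr', hreach⟩
    exact ⟨hdg, c', Or.inl hc', hv', hnbr', hreach⟩

lemma pvZ_comp_disjoint {n m : Int} {v : Int × Int → Int} {pf : List (Int × Int)}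
    {c : Int × Int} (hm : 0 < m) (hc : pvInG n m c) (hcz : c ∉ pvZ n m v pf) :
    Disjoint (pvZ n m v pf) (pvComp n m v c) := by
  rw [Finset.disjoint_right]
  intro d hd hdz
  obtain ⟨_, hr⟩ := (pv_mem_comp n m v c d).mp hd
  exact pvZ_reach_closed hm hc hcz hr hdz

-- ---- BFS

lemma pv_push_mem (n m : Int) (g : PySem.Dict Int (List Int)) (num : Int)
    (c d : Int × Int) (hm : 0 < m) (hc : pvInG n m c) :
    d ∈ pvPush n m g num c ↔ pvRN n m (fun e => pvRead g e.1 e.2) num c d := by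
  obtain ⟨hc1, hc2, hc3, hc4⟩ := hc
  have hself : c.2 % m = c.2 := Int.emod_eq_of_lt hc3 hc4
  have e1 : c.1 + -1 = c.1 - 1 := by ring
  have e2 : (c.2 + 0) % m = c.2 := by rw [add_zero, hself]
  have e3 : c.1 + 0 = c.1 := by ring
  have e4 : c.2 + -1 = c.2 - 1 := by ring
  simp only [pvPush, List.mem_filterMap, List.mem_cons, List.not_mem_nil, or_false,
    PySem.Int.mod_eq_emod_of_pos hm, pvRN, pvMov]
  constructor
  · rintro ⟨dd, (rfl | rfl | rfl | rfl), hif⟩ <;>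
      rw [ite_eq_iff] at hif <;>
      rcases hif with ⟨⟨hb1, hb2, hw⟩, hsome⟩ | ⟨_, hnone⟩ <;>
      first
      | exact absurd hnone (by simp)
      | (injection hsome with h; subst h)
    · exact ⟨Or.inl (by rw [e1, e2]), by omega, by omega, hw⟩
    · exact ⟨Or.inr (Or.inl (by rw [e2])), by omega, by omega, hw⟩
    · exact ⟨Or.inr (Or.inr (Or.inl (by rw [e3]))), by omega, by omega, hw⟩
    · exact ⟨Or.inr (Or.inr (Or.inr (by rw [e3, e4]))), by omega, by omega, hw⟩
  · rintro ⟨(rfl | rfl | rfl | rfl), hb1, hb2, hw⟩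
    · refine ⟨(-1, 0), by simp, ?_⟩
      rw [if_pos ⟨by omega, by omega, by rw [e1, e2]; exact hw⟩, e1, e2]
    · refine ⟨(1, 0), by simp, ?_⟩
      rw [if_pos ⟨by omega, by omega, by rw [e2]; exact hw⟩, e2]
    · refine ⟨(0, 1), by simp, ?_⟩
      rw [if_pos ⟨by omega, by omega, by rw [e3]; exact hw⟩, e3]
    · refine ⟨(0, -1), by simp, ?_⟩
      rw [if_pos ⟨by omega, by omega, by rw [e3, e4]; exact hw⟩, e3, e4]

lemma pv_len_le_card (n m : Int) (l : List (Int × Int)) (hnd : l.Nodup)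
    (hg : ∀ x ∈ l, pvInG n m x) : l.length ≤ (pvGridF n m).card := by
  rw [← List.toFinset_card_of_nodup hnd]
  exact Finset.card_le_card (fun x hx => (pv_mem_gridF n m x).mpr (hg x (List.mem_toFinset.mp hx)))

lemma pv_rtg_closed {n m : Int} {w : Int × Int → Int} {num : Int}
    {vis q : List (Int × Int)} {c d : Int × Int}
    (hcl : ∀ x ∈ vis, ∀ d, pvRN n m w num x d → d ∈ vis ∨ d ∈ q)
    (hc : c ∈ vis) (h : Relation.ReflTransGen (pvRN n m w num) c d) :
    d ∈ vis ∨ ∃ x ∈ q, Relation.ReflTransGen (pvRN n m w num) x d := by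
  induction h with
  | refl => exact Or.inl hc
  | tail _ hR ih =>
      rcases ih with hb | ⟨x, hx, hr⟩
      · rcases hcl _ hb _ hR with h | h
        · exact Or.inl h
        · exact Or.inr ⟨_, h, .refl⟩
      · exact Or.inr ⟨x, hx, hr.tail hR⟩

lemma pvBfs_spec (n m : Int) (g : PySem.Dict Int (List Int)) (num : Int) (hm : 0 < m) :
    ∀ (fuel : Nat) (q vis : List (Int × Int)),
    vis.Nodup →
    (∀ x ∈ vis, pvInG n m x) →
    (∀ x ∈ q, pvInG n m x) →
    (∀ x ∈ vis, ∀ d, pvRN n m (fun e => pvRead g e.1 e.2) num x d → d ∈ vis ∨ d ∈ q) →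
    5 * ((pvGridF n m).card - vis.length) + q.length ≤ fuel →
    (pvBfs n m g num fuel q vis).Nodup ∧
    (∀ x ∈ pvBfs n m g num fuel q vis, pvInG n m x) ∧
    (∀ d, d ∈ pvBfs n m g num fuel q vis ↔
      d ∈ vis ∨ ∃ x ∈ q, Relation.ReflTransGen (pvRN n m (fun e => pvRead g e.1 e.2) num) x d) := by
  intro fuel
  induction fuel with
  | zero =>
      intro q vis hnd hvg hqg hcl hfuel
      cases q with
      | nil => exact ⟨hnd, hvg, by simp [pvBfs]⟩
      | cons c q => simp at hfuel
  | succ fuel ih =>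
      intro q vis hnd hvg hqg hcl hfuel
      cases q with
      | nil => exact ⟨hnd, hvg, by simp [pvBfs]⟩
      | cons c q =>
        by_cases hcv : c ∈ vis
        · have hcl' : ∀ x ∈ vis, ∀ d, pvRN n m (fun e => pvRead g e.1 e.2) num x d →
              d ∈ vis ∨ d ∈ q := by
            intro x hx d hR
            rcases hcl x hx d hR with h | h
            · exact Or.inl h
            · rcases List.mem_cons.mp h with rfl | h
              · exact Or.inl hcv
              · exact Or.inr h
          have hih := ih q vis hnd hvg (fun x hx => hqg x (List.mem_cons_of_mem _ hx)) hcl'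
            (by simp only [List.length_cons] at hfuel; omega)
          have heq : pvBfs n m g num (fuel + 1) (c :: q) vis = pvBfs n m g num fuel q vis := by
            simp [pvBfs, hcv]
          rw [heq]
          refine ⟨hih.1, hih.2.1, fun d => ?_⟩
          rw [hih.2.2 d]
          constructor
          · rintro (h | ⟨x, hx, hr⟩)
            · exact Or.inl h
            · exact Or.inr ⟨x, List.mem_cons_of_mem _ hx, hr⟩
          · rintro (h | ⟨x, hx, hr⟩)
            · exact Or.inl h
            · rcases List.mem_cons.mp hx with rfl | hx
              · exact pv_rtg_closed hcl' hcv hr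
              · exact Or.inr ⟨x, hx, hr⟩
        · have hcg : pvInG n m c := hqg c List.mem_cons_self
          have hvis' : PySem.Set.add vis c = vis ++ [c] := PySem.Set.add_of_not_mem hcv
          have hpush : ∀ d, d ∈ pvPush n m g num c ↔
              pvRN n m (fun e => pvRead g e.1 e.2) num c d :=
            fun d => pv_push_mem n m g num c d hm hcg
          have hnd' : (vis ++ [c]).Nodup := by
            simp only [List.nodup_append, List.nodup_singleton, true_and]
            refine ⟨hnd, fun a ha b hb => ?_⟩
            rcases List.mem_singleton.mp hb with rfl
            exact fun h => hcv (h ▸ ha)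
          have hvg' : ∀ x ∈ vis ++ [c], pvInG n m x := by
            intro x hx
            rcases List.mem_append.mp hx with h | h
            · exact hvg x h
            · rcases List.mem_singleton.mp h with rfl; exact hcg
          have hqg' : ∀ x ∈ q ++ pvPush n m g num c, pvInG n m x := by
            intro x hx
            rcases List.mem_append.mp hx with h | h
            · exact hqg x (List.mem_cons_of_mem _ h)
            · have hRN := (hpush x).mp h
              exact ⟨hRN.2.1, hRN.2.2.1, pv_mov_col n m c x hm hcg hRN.1⟩
          have hcl'' : ∀ x ∈ vis ++ [c], ∀ d, pvRN n m (fun e => pvRead g e.1 e.2) num x d →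
              d ∈ vis ++ [c] ∨ d ∈ q ++ pvPush n m g num c := by
            intro x hx d hR
            rcases List.mem_append.mp hx with h | h
            · rcases hcl x h d hR with h2 | h2
              · exact Or.inl (List.mem_append.mpr (Or.inl h2))
              · rcases List.mem_cons.mp h2 with rfl | h2
                · exact Or.inl (by simp)
                · exact Or.inr (List.mem_append.mpr (Or.inl h2))
            · rcases List.mem_singleton.mp h with rfl
              exact Or.inr (List.mem_append.mpr (Or.inr ((hpush d).mpr hR)))
          have hlen : (vis ++ [c]).length ≤ (pvGridF n m).card := pv_len_le_card n m _ hnd' hvg'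
          have hplen : (pvPush n m g num c).length ≤ 4 := by
            refine le_trans (List.length_filterMap_le _ _) (by simp)
          have hih := ih (q ++ pvPush n m g num c) (vis ++ [c]) hnd' hvg' hqg' hcl'' (by
            simp only [List.length_append, List.length_cons, List.length_singleton] at hfuel hlen ⊢
            omega)
          have heq : pvBfs n m g num (fuel + 1) (c :: q) vis =
              pvBfs n m g num fuel (q ++ pvPush n m g num c) (vis ++ [c]) := by
            simp [pvBfs, hcv, hvis']
          rw [heq]
          refine ⟨hih.1, hih.2.1, fun d => ?_⟩
          rw [hih.2.2 d]
          constructor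
          · rintro (h | ⟨x, hx, hr⟩)
            · rcases List.mem_append.mp h with h | h
              · exact Or.inl h
              · rcases List.mem_singleton.mp h with rfl
                exact Or.inr ⟨d, List.mem_cons_self, .refl⟩
            · rcases List.mem_append.mp hx with hx | hx
              · exact Or.inr ⟨x, List.mem_cons_of_mem _ hx, hr⟩
              · exact Or.inr ⟨c, List.mem_cons_self, .head ((hpush x).mp hx) hr⟩
          · rintro (h | ⟨x, hx, hr⟩)
            · exact Or.inl (List.mem_append.mpr (Or.inl h))
            · rcases List.mem_cons.mp hx with rfl | hx
              · rcases Relation.ReflTransGen.cases_head hr with rfl | ⟨e, hRN, hr'⟩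
                · exact Or.inl (by simp)
                · exact Or.inr ⟨e, List.mem_append.mpr (Or.inr ((hpush e).mpr hRN)), hr'⟩
              · exact Or.inr ⟨x, List.mem_append.mpr (Or.inl hx), hr⟩

-- BFS from one grid cell computes the reachable set of the current grid
lemma pvBfs_start (n m : Int) (g : PySem.Dict Int (List Int)) (num : Int)
    (c : Int × Int) (hm : 0 < m) (hc : pvInG n m c) :
    (pvBfs n m g num (1 + 5 * (n.toNat * m.toNat)) [c] PySem.Set.empty).Nodup ∧
    (∀ d, d ∈ pvBfs n m g num (1 + 5 * (n.toNat * m.toNat)) [c] PySem.Set.empty ↔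
      Relation.ReflTransGen (pvRN n m (fun e => pvRead g e.1 e.2) num) c d) := by
  have h := pvBfs_spec n m g num hm (1 + 5 * (n.toNat * m.toNat)) [c] PySem.Set.empty
    (by simp [PySem.Set.empty]) (by simp [PySem.Set.empty]) (by simpa using hc) (by simp [PySem.Set.empty])
    (by rw [pv_gridF_card]; simp [PySem.Set.empty])
  refine ⟨h.1, fun d => ?_⟩
  rw [h.2.2 d]
  simp [PySem.Set.empty]

-- bridge: BFS reachability on the current (partially zeroed) grid = reachability in v
lemma pv_reach_bridge {n m num : Int} {v w : Int × Int → Int} {pf : List (Int × Int)}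
    {c d : Int × Int} (hm : 0 < m)
    (hw : ∀ e, pvInG n m e → w e = if e ∈ pvZ n m v pf then 0 else v e)
    (hc : pvInG n m c) (hcz : c ∉ pvZ n m v pf) (hnum0 : v c ≠ 0) (hnum : num = v c) :
    Relation.ReflTransGen (pvRN n m w num) c d ↔ pvReach n m v c d := by
  constructor
  · intro h
    suffices hs : pvReach n m v c d ∧ pvInG n m d ∧ d ∉ pvZ n m v pf ∧ v d = num from hs.1
    induction h with
    | refl => exact ⟨.refl, hc, hcz, hnum.symm⟩
    | tail hcb hR ih =>
        rename_i b d'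
        obtain ⟨hreach, hbg, hbz, hbv⟩ := ih
        obtain ⟨hmov, hb1, hb2, hwd⟩ := hR
        have hdg : pvInG n m d' := ⟨hb1, hb2, pv_mov_col n m b d' hm hbg hmov⟩
        have hdz : d' ∉ pvZ n m v pf := by
          intro hz
          rw [hw d' hdg, if_pos hz] at hwd
          omega
        have hvd : v d' = num := by
          have h2 := hw d' hdg
          rw [if_neg hdz] at h2
          rw [← h2]; exact hwd
        exact ⟨hreach.tail ⟨hmov, hb1, hb2, by rw [hvd, hbv]⟩, hdg, hdz, hvd⟩
  · intro h
    suffices hs : Relation.ReflTransGen (pvRN n m w num) c d ∧ pvInG n m d ∧ d ∉ pvZ n m v pf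
      from hs.1
    induction h with
    | refl => exact ⟨.refl, hc, hcz⟩
    | tail hcb hR ih =>
        rename_i b d'
        obtain ⟨hrtg, hbg, hbz⟩ := ih
        have hdz := pvZ_closed hm hbg hbz hR
        have hdg := pvR_InG hm hbg hR
        have hvd : v d' = num := by rw [hR.2.2.2, pvReach_val hcb, ← hnum]
        have hwd : w d' = num := by rw [hw d' hdg, if_neg hdz]; exact hvd
        exact ⟨hrtg.tail ⟨hR.1, hR.2.1, hR.2.2.1, hwd⟩, hdg, hdz⟩

-- ---- value-map update lemmas

lemma pv_read_zero1 {n m : Int} (g : PySem.Dict Int (List Int)) (a : Int × Int)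
    (hrow : ∀ i : Int, 1 ≤ i → i ≤ n → g.contains i = true ∧ m ≤ ((g.getD i []).length : Int))
    (ha : pvInG n m a) (c : Int × Int) (hc : pvInG n m c) :
    pvRead (g.modify a.1 [] (fun row => PySem.List.pySetD row a.2 0)) c.1 c.2 =
      if c = a then 0 else pvRead g c.1 c.2 := by
  obtain ⟨ha1, ha2, ha3, ha4⟩ := ha
  obtain ⟨hc1, hc2, hc3, hc4⟩ := hc
  have hlen : m ≤ ((g.getD a.1 []).length : Int) := (hrow a.1 ha1 ha2).2
  unfold pvRead
  rw [PySem.Dict.getD_modify]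
  by_cases hii : c.1 = a.1
  · rw [if_pos hii]
    rw [PySem.List.pySetD_of_nonneg _ 0 ha3]
    rw [PySem.List.pyGetD_eq_getElem _ 0 hc3 (by rw [List.length_set]; push_cast; omega)]
    rw [List.getElem_set]
    by_cases hjj : c.2 = a.2
    · rw [if_pos (by omega), if_pos (by rw [Prod.ext_iff]; exact ⟨hii, hjj⟩)]
    · have hlen2 : m ≤ ((g.getD c.1 []).length : Int) := by rw [hii]; exact hlen
      rw [if_neg (by omega), if_neg (by rw [Prod.ext_iff]; exact fun h => hjj h.2)]
      rw [PySem.List.pyGetD_eq_getElem _ 0 hc3 (by push_cast; omega)]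
      have hre : g.getD c.1 [] = g.getD a.1 [] := by rw [hii]
      simp only [hre]
  · rw [if_neg hii, if_neg (by rw [Prod.ext_iff]; exact fun h => hii h.1)]

lemma pv_zero1_rows {n m : Int} (g : PySem.Dict Int (List Int)) (a : Int × Int)
    (hrow : ∀ i : Int, 1 ≤ i → i ≤ n → g.contains i = true ∧ m ≤ ((g.getD i []).length : Int)) :
    ∀ i : Int, 1 ≤ i → i ≤ n →
      (g.modify a.1 [] (fun row => PySem.List.pySetD row a.2 0)).contains i = true ∧
      m ≤ (((g.modify a.1 [] (fun row => PySem.List.pySetD row a.2 0)).getD i []).length : Int) := by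
  intro i h1 h2
  refine ⟨by rw [PySem.Dict.contains_modify, (hrow i h1 h2).1, Bool.or_true], ?_⟩
  rw [PySem.Dict.getD_modify]
  by_cases hii : i = a.1
  · rw [if_pos hii, PySem.List.length_pySetD]
    exact hii ▸ (hrow a.1 (hii ▸ h1) (hii ▸ h2)).2
  · rw [if_neg hii]
    exact (hrow i h1 h2).2

lemma pv_zero_read {n m : Int} (L : List (Int × Int)) (g : PySem.Dict Int (List Int))
    (hL : ∀ x ∈ L, pvInG n m x)
    (hrow : ∀ i : Int, 1 ≤ i → i ≤ n → g.contains i = true ∧ m ≤ ((g.getD i []).length : Int)) :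
    (∀ c : Int × Int, pvInG n m c →
      pvRead (pvZero g L) c.1 c.2 = if c ∈ L then 0 else pvRead g c.1 c.2) ∧
    (∀ i : Int, 1 ≤ i → i ≤ n →
      (pvZero g L).contains i = true ∧ m ≤ (((pvZero g L).getD i []).length : Int)) := by
  induction L generalizing g with
  | nil => exact ⟨fun c _ => by simp [pvZero], hrow⟩
  | cons a L ih =>
      have ha := hL a List.mem_cons_self
      have hrows' := pv_zero1_rows (n := n) (m := m) g a hrow
      have hzeq : pvZero g (a :: L) =
          pvZero (g.modify a.1 [] (fun row => PySem.List.pySetD row a.2 0)) L := rfl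
      have hih := ih (g.modify a.1 [] (fun row => PySem.List.pySetD row a.2 0))
        (fun x hx => hL x (List.mem_cons_of_mem _ hx)) hrows'
      refine ⟨fun c hcg => ?_, hzeq ▸ hih.2⟩
      rw [hzeq, hih.1 c hcg, pv_read_zero1 g a hrow ha c hcg]
      by_cases hcl : c ∈ L
      · rw [if_pos hcl, if_pos (List.mem_cons_of_mem _ hcl)]
      · rw [if_neg hcl]
        by_cases hca : c = a
        · rw [if_pos hca, if_pos (show c ∈ a :: L by simp [hca])]
        · rw [if_neg hca, if_neg (by simp [hca, hcl])]

-- ---- the step and fold lemmas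

lemma pvStep_inv {n m : Int} {v : Int × Int → Int} (hm : 0 < m)
    (pf : List (Int × Int)) (c : Int × Int) (hc : pvInG n m c)
    (st : Int × PySem.Dict Int (List Int)) (h : pvInv n m v pf st) :
    pvInv n m v (pf ++ [c]) (pvStepA n m st c) := by
  obtain ⟨hcard, hread, hrow⟩ := h
  by_cases hz : v c = 0 ∨ c ∈ pvZ n m v pf
  · have hnum : pvRead st.2 c.1 c.2 = 0 := by
      rw [hread c hc]
      by_cases hcZ : c ∈ pvZ n m v pf
      · rw [if_pos hcZ]
      · rw [if_neg hcZ]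
        rcases hz with h0 | h0
        · exact h0
        · exact absurd h0 hcZ
    have hst : pvStepA n m st c = st := by
      simp only [pvStepA]
      rw [if_pos hnum]
    rw [hst]
    unfold pvInv
    rw [pvZ_append_zero hz]
    exact ⟨hcard, hread, hrow⟩
  · push_neg at hz
    obtain ⟨hv0, hcz⟩ := hz
    have hnum : pvRead st.2 c.1 c.2 = v c := by rw [hread c hc, if_neg hcz]
    have hnum0 : ¬ pvRead st.2 c.1 c.2 = 0 := by rw [hnum]; exact hv0
    have hbfs := pvBfs_start n m st.2 (pvRead st.2 c.1 c.2) c hm hc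
    set S := pvBfs n m st.2 (pvRead st.2 c.1 c.2) (1 + 5 * (n.toNat * m.toNat)) [c]
      PySem.Set.empty with hSdef
    have hmemS : ∀ d, d ∈ S ↔ pvReach n m v c d := by
      intro d
      rw [hbfs.2 d]
      exact pv_reach_bridge hm hread hc hcz hv0 hnum
    have hSfin : S.toFinset = pvComp n m v c := by
      ext d
      rw [List.mem_toFinset, hmemS d, pv_mem_comp]
      exact ⟨fun hr => ⟨pvReach_InG hm hc hr, hr⟩, And.right⟩
    have hSlen : S.length = (pvComp n m v c).card := by
      rw [← hSfin, List.toFinset_card_of_nodup hbfs.1]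
    have hstep : pvStepA n m st c =
        if 1 < S.length then (st.1 + (S.length : Int), pvZero st.2 S) else st := by
      simp only [pvStepA]
      rw [if_neg hnum0]
    rw [hstep]
    have hloc : (1 < S.length) ↔ pvHasNbr n m v c := by
      rw [hSlen]; exact pv_card_comp n m v c hm hc
    by_cases hbr : 1 < S.length
    · rw [if_pos hbr]
      have hnbr := hloc.mp hbr
      have hZ' := pvZ_append_comp (pf := pf) hm hc hv0 hnbr
      have hdisj := pvZ_comp_disjoint (pf := pf) (v := v) hm hc hcz
      have hcardZ : (pvZ n m v (pf ++ [c])).card =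
          (pvZ n m v pf).card + (pvComp n m v c).card := by
        rw [hZ', Finset.card_union_of_disjoint hdisj]
      have hSg : ∀ x ∈ S, pvInG n m x := fun x hx => pvReach_InG hm hc ((hmemS x).mp hx)
      have hzr := pv_zero_read (n := n) (m := m) S st.2 hSg hrow
      refine ⟨?_, ?_, hzr.2⟩
      · show st.1 + (S.length : Int) = _
        rw [hcard, hcardZ, hSlen]
        push_cast
        ring
      · intro e heg
        show pvRead (pvZero st.2 S) e.1 e.2 = _
        rw [hzr.1 e heg]
        by_cases heS : e ∈ S
        · rw [if_pos heS, if_pos (by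
            rw [hZ']
            exact Finset.mem_union_right _ (by rw [← hSfin]; exact List.mem_toFinset.mpr heS))]
        · rw [if_neg heS, hread e heg]
          by_cases heZ : e ∈ pvZ n m v pf
          · rw [if_pos heZ, if_pos (by rw [hZ']; exact Finset.mem_union_left _ heZ)]
          · rw [if_neg heZ, if_neg (by
              rw [hZ']
              intro hmem
              rcases Finset.mem_union.mp hmem with h2 | h2
              · exact heZ h2
              · exact heS (List.mem_toFinset.mp (by rw [hSfin]; exact h2)))]
    · rw [if_neg hbr]
      unfold pvInv
      rw [pvZ_append_nonbr (fun hh => hbr (hloc.mpr hh))]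
      exact ⟨hcard, hread, hrow⟩

lemma pvFold_inv {n m : Int} {v : Int × Int → Int} (hm : 0 < m) :
    ∀ (suf pf : List (Int × Int)) (st : Int × PySem.Dict Int (List Int)),
      (∀ x ∈ suf, pvInG n m x) → pvInv n m v pf st →
      pvInv n m v (pf ++ suf) (suf.foldl (pvStepA n m) st) := by
  intro suf
  induction suf with
  | nil => intro pf st _ h; simpa using h
  | cons c suf ih =>
      intro pf st hg h
      have h1 := pvStep_inv hm pf c (hg c (by simp)) st h
      have h2 := ih (pf ++ [c]) (pvStepA n m st c) (fun x hx => hg x (by simp [hx])) h1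
      simpa using h2

-- ---- nested loops = flat fold over the cell list

def pvCells (n m : Int) : List (Int × Int) :=
  (PySem.List.pyRange 1 (n + 1) 1).flatMap (fun i =>
    (PySem.List.pyRange 0 m 1).map (fun j => (i, j)))

lemma pv_nested_eq_flat {α : Type} (la lb : List Int) (f : α → Int → Int → α) (st0 : α) :
    la.foldl (fun st i => lb.foldl (fun st j => f st i j) st) st0 =
      (la.flatMap (fun i => lb.map (fun j => (i, j)))).foldl (fun st c => f st c.1 c.2) st0 := by
  induction la generalizing st0 with
  | nil => rfl
  | cons a la ih => simp [List.foldl_append, List.foldl_map, ih]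

lemma pv_mem_cells (n m : Int) (c : Int × Int) : c ∈ pvCells n m ↔ pvInG n m c := by
  obtain ⟨a, b⟩ := c
  simp [pvCells, PySem.List.mem_pyRange_one, pvInG]
  omega

lemma pv_cells_nodup (n m : Int) : (pvCells n m).Nodup :=
  List.Nodup.product (PySem.List.nodup_pyRange_one 1 (n + 1)) (PySem.List.nodup_pyRange_one 0 m)

-- ---- final characterizations

lemma pvZ_full (n m : Int) (v : Int × Int → Int) (hm : 0 < m) :
    pvZ n m v (pvCells n m) =
      @Finset.filter _ (fun c => v c ≠ 0 ∧ pvHasNbr n m v c)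
        (fun _ => Classical.propDecidable _) (pvGridF n m) := by
  ext d
  simp only [pv_mem_Z, Finset.mem_filter, pv_mem_gridF]
  constructor
  · rintro ⟨hdg, c', hc', hv', hnbr', hreach⟩
    have hcg : pvInG n m c' := (pv_mem_cells n m c').mp hc'
    refine ⟨hdg, ?_, ?_⟩
    · rw [pvReach_val hreach]; exact hv'
    · have hcomp := pv_comp_eq hm hcg hreach
      exact (pv_card_comp n m v d hm hdg).mp
        (by rw [hcomp]; exact (pv_card_comp n m v c' hm hcg).mpr hnbr')
  · rintro ⟨hdg, hv, hnbr⟩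
    exact ⟨hdg, d, (pv_mem_cells n m d).mpr hdg, hv, hnbr, .refl⟩

lemma pv_count_eq (n m : Int) (P : Int × Int → Prop)
    (Q : Int × Int → Bool) (hPQ : ∀ c, pvInG n m c → (Q c = true ↔ P c)) :
    ((pvCells n m).foldl (fun r c => if Q c then r + 1 else r) (0 : Int)) =
      ((@Finset.filter _ P (fun _ => Classical.propDecidable _) (pvGridF n m)).card : Int) := by
  have key : ∀ (l : List (Int × Int)) (init : Int),
      l.foldl (fun r c => if Q c then r + 1 else r) init = init + (l.countP Q : Int) := by
    intro l
    induction l with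
    | nil => intro init; simp
    | cons a l ih =>
        intro init
        simp only [List.foldl_cons, List.countP_cons]
        rw [ih]
        by_cases h : Q a <;> simp [h] <;> push_cast <;> ring
  rw [key]
  have hfin : ((pvCells n m).filter Q).toFinset =
      @Finset.filter _ P (fun _ => Classical.propDecidable _) (pvGridF n m) := by
    ext e
    rw [List.mem_toFinset, List.mem_filter,
      @Finset.mem_filter _ P (fun _ => Classical.propDecidable _) (pvGridF n m) e,
      pv_mem_cells, pv_mem_gridF]
    constructor
    · rintro ⟨he, hq⟩; exact ⟨he, (hPQ e he).mp hq⟩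
    · rintro ⟨he, hp⟩; exact ⟨he, (hPQ e he).mpr hp⟩
  rw [← hfin, List.toFinset_card_of_nodup ((pv_cells_nodup n m).filter _),
    List.countP_eq_length_filter]
  simp

lemma pv_localnbr (n m : Int) (g : PySem.Dict Int (List Int)) (c : Int × Int)
    (hm : 0 < m) (hc : pvInG n m c) :
    pvHasNbrB n m g c.1 c.2 (pvRead g c.1 c.2) = true ↔
      pvHasNbr n m (fun e => pvRead g e.1 e.2) c := by
  obtain ⟨hc1, hc2, hc3, hc4⟩ := hc
  have hself : c.2 % m = c.2 := Int.emod_eq_of_lt hc3 hc4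
  simp only [pvHasNbrB, Bool.or_eq_true, Bool.and_eq_true, decide_eq_true_eq]
  constructor
  · rintro ((⟨hi, hv⟩ | ⟨hi, hv⟩) | ⟨hm1, (hv | hv)⟩)
    · exact ⟨(c.1 - 1, c.2), by simp [Prod.ext_iff], Or.inl rfl, by omega, by omega, hv⟩
    · exact ⟨(c.1 + 1, c.2), by simp [Prod.ext_iff], Or.inr (Or.inl rfl), by omega, by omega, hv⟩
    · refine ⟨(c.1, PySem.Int.mod (c.2 + 1) m), ?_, Or.inr (Or.inr (Or.inl rfl)), by omega, by omega, hv⟩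
      simp only [Ne, Prod.ext_iff, not_and]
      intro _
      rw [PySem.Int.mod_eq_emod_of_pos hm]
      rcases lt_or_eq_of_le (by omega : c.2 + 1 ≤ m) with h | h
      · rw [Int.emod_eq_of_lt (by omega) h]; omega
      · rw [h, Int.emod_self]; omega
    · refine ⟨(c.1, PySem.Int.mod (c.2 - 1) m), ?_, Or.inr (Or.inr (Or.inr rfl)), by omega, by omega, hv⟩
      simp only [Ne, Prod.ext_iff, not_and]
      intro _
      rw [PySem.Int.mod_eq_emod_of_pos hm]
      rcases eq_or_lt_of_le hc3 with h0 | h0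
      · have h1 : c.2 - 1 = -1 + m * 0 := by omega
        have h2 : (m - 1) % m = (-1 + m * 1) % m := by ring_nf
        have key : (c.2 - 1) % m = (m - 1) % m := by
          rw [h1, h2, Int.add_mul_emod_self_left, Int.add_mul_emod_self_left]
        rw [key, Int.emod_eq_of_lt (by omega) (by omega)]; omega
      · rw [Int.emod_eq_of_lt (by omega) (by omega)]; omega
  · rintro ⟨d, hdne, (rfl | rfl | rfl | rfl), hb1, hb2, hv⟩
    · exact Or.inl (Or.inl ⟨by omega, hv⟩)
    · exact Or.inl (Or.inr ⟨by omega, hv⟩)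
    · refine Or.inr ⟨?_, Or.inl hv⟩
      by_contra hm1
      have hmeq : m = 1 := by omega
      apply hdne
      have : c.2 = 0 := by omega
      simp [Prod.ext_iff, hmeq, this]
    · refine Or.inr ⟨?_, Or.inr hv⟩
      by_contra hm1
      have hmeq : m = 1 := by omega
      apply hdne
      have : c.2 = 0 := by omega
      simp [Prod.ext_iff, hmeq, this]

-- A with m ≤ 0 returns 0
lemma pvA_nonpos (n m : Int) (plates : List (Int × List Int)) (hm : m ≤ 0) :
    remove_adjacents n m plates = 0 := by
  unfold remove_adjacents
  rw [PySem.List.pyRange_one_eq_nil (by omega)]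
  simp [List.foldl_fixed]

lemma pvB_nonpos (n m : Int) (plates : List (Int × List Int)) (hm : m ≤ 0) :
    remove_adjacents_alt n m plates = 0 := by
  unfold remove_adjacents_alt
  rw [PySem.List.pyRange_one_eq_nil (by omega)]
  simp [List.foldl_fixed]

-- ===== VERDICT (by name: the statement is the Claim_ definition above) =====
theorem remove_adjacents_spec : Claim_equal_remove_adjacents := by
  unfold Claim_equal_remove_adjacents
  intro n m plates _ hpre
  unfold Spec_remove_adjacents
  by_cases hm : m ≤ 0
  · rw [pvA_nonpos n m plates hm, pvB_nonpos n m plates hm]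
  · push_neg at hm
    have hrow : ∀ i : Int, 1 ≤ i → i ≤ n → (PySem.Dict.mk plates).contains i = true ∧
        m ≤ (((PySem.Dict.mk plates).getD i []).length : Int) := by
      rcases hpre with h0 | hpre
      · omega
      · intro i h1 h2
        exact hpre i (by rw [PySem.List.mem_pyRange_one]; omega)
    set g0 := PySem.Dict.mk plates with hg0
    set v : Int × Int → Int := fun e => pvRead g0 e.1 e.2 with hvdef
    have hZnil : pvZ n m v [] = ∅ := by
      ext d; simp [pv_mem_Z]
    have hInv0 : pvInv n m v [] (0, g0) := by
      refine ⟨by rw [hZnil]; simp, fun c hcg => by rw [if_neg (by rw [hZnil]; simp)], hrow⟩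
    have hcells : ∀ x ∈ pvCells n m, pvInG n m x := fun x hx => (pv_mem_cells n m x).mp hx
    have hfold := pvFold_inv (v := v) hm (pvCells n m) [] (0, g0) hcells hInv0
    have hA : remove_adjacents n m plates = ((pvZ n m v (pvCells n m)).card : Int) := by
      unfold remove_adjacents
      rw [pv_nested_eq_flat _ _ (fun st i j => pvStepA n m st (i, j))]
      have := hfold.1
      simp only [List.nil_append] at this
      rw [← this]
      rfl
    have hQdef : ∀ (r : Int) (c : Int × Int),
        (let num := pvRead g0 c.1 c.2
         if num = 0 then r else if pvHasNbrB n m g0 c.1 c.2 num then r + 1 else r) =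
        (if (decide (¬ pvRead g0 c.1 c.2 = 0) &&
              pvHasNbrB n m g0 c.1 c.2 (pvRead g0 c.1 c.2)) = true then r + 1 else r) := by
      intro r c
      by_cases h0 : pvRead g0 c.1 c.2 = 0
      · simp [h0]
      · by_cases hb : pvHasNbrB n m g0 c.1 c.2 (pvRead g0 c.1 c.2) = true <;> simp [h0, hb]
    have hB : remove_adjacents_alt n m plates =
        ((pvCells n m).foldl (fun r c =>
          if (decide (¬ pvRead g0 c.1 c.2 = 0) &&
              pvHasNbrB n m g0 c.1 c.2 (pvRead g0 c.1 c.2)) = true then r + 1 else r) 0) := by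
      show ((PySem.List.pyRange 1 (n + 1) 1).foldl (fun removed i =>
        (PySem.List.pyRange 0 m 1).foldl (fun removed j =>
          let num := pvRead g0 i j
          if num = 0 then removed
          else if pvHasNbrB n m g0 i j num then removed + 1 else removed) removed) 0) = _
      rw [pv_nested_eq_flat _ _ (fun r i j =>
        let num := pvRead g0 i j
        if num = 0 then r else if pvHasNbrB n m g0 i j num then r + 1 else r)]
      exact PySem.List.foldl_congr_mem _ _ _ _ (fun r c _ => hQdef r c)
    rw [hA, hB, pv_count_eq n m (fun c => v c ≠ 0 ∧ pvHasNbr n m v c) _ (fun c hcg => ?_),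
      ← pvZ_full n m v hm]
    rw [Bool.and_eq_true, decide_eq_true_eq]
    constructor
    · rintro ⟨h0, hb⟩
      exact ⟨h0, (pv_localnbr n m g0 c hm hcg).mp hb⟩
    · rintro ⟨h0, hb⟩
      exact ⟨h0, (pv_localnbr n m g0 c hm hcg).mpr hb⟩
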